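-- pv_equiv track=rewrite | github.com/ScumbagJones/Webscraper-Site-Analyzer | deep_evidence_engine.py | _detect_url_patterns
-- ===== SOURCE A (Python) =====
-- from typing import Dict, List, Optional
--
-- def _detect_url_patterns(paths: List[str]) -> Dict:
--     """
--     Detect common URL patterns from a list of paths
--
--     Returns:
--         {
--             'articles': '/p/{slug}',
--             'sections': '/{name}',
--             ...
--         }
--     """
--     patterns = {}
--
--     # Common article patterns
--     article_patterns = ['/p/', '/post/', '/article/', '/blog/', '/read/', '/editorial/', '/story/']
--     for pattern in article_patterns:
--         if any(pattern in path for path in paths):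
--             patterns['articles'] = f"{pattern}{{slug}}"
--             break
--
--     # Section patterns (single-level paths)
--     single_level = [p for p in paths if p and p.count('/') == 2 and p.startswith('/') and p.endswith('/')]
--     if single_level:
--         patterns['sections'] = '/{section-name}'
--
--     # Tag patterns
--     if any('/tag/' in path or '/tags/' in path for path in paths):
--         patterns['tags'] = '/tag/{tag-name}'
--
--     # Category patterns
--     if any('/category/' in path or '/categories/' in path for path in paths):
--         patterns['categories'] = '/category/{category-name}'
--
--     return patterns
-- ===== SOURCE B (Python) =====
-- def _detect_url_patterns(paths):
--     article_patterns = ['/p/', '/post/', '/article/', '/blog/', '/read/', '/editorial/', '/story/']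
--     found = set()
--     has_section = has_tag = has_category = False
--     for p in paths:
--         for m in article_patterns:
--             if m in p:
--                 found.add(m)
--         if p and p.count('/') == 2 and p.startswith('/') and p.endswith('/'):
--             has_section = True
--         if '/tag/' in p or '/tags/' in p:
--             has_tag = True
--         if '/category/' in p or '/categories/' in p:
--             has_category = True
--     patterns = {}
--     winner = next((m for m in article_patterns if m in found), None)
--     if winner is not None:
--         patterns['articles'] = winner + '{slug}'
--     if has_section:
--         patterns['sections'] = '/{section-name}'
--     if has_tag:
--         patterns['tags'] = '/tag/{tag-name}'
--     if has_category:
--         patterns['categories'] = '/category/{category-name}'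
--     return patterns
-- ===== Notes on version B (the rewrite author's own statement) =====
-- stated objective: alternative
-- what changed: Replaces A's many separate scans over paths (one 'any' per article pattern plus filter/any scans for sections, tags, categories) by a single pass that accumulates a set of seen article markers and three boolean flags, resolving the article winner against the canonical pattern list afterwards.
import Mathlib
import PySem

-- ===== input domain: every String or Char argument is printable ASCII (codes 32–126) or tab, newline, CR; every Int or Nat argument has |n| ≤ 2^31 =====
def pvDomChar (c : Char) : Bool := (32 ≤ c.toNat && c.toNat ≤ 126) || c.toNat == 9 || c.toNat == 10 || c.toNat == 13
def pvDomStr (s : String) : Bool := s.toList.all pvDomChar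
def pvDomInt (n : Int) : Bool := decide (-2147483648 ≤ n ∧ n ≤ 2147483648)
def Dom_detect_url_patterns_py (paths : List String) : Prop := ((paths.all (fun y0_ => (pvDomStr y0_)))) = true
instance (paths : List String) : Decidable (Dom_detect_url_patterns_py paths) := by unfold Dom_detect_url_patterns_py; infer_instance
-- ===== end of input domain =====

-- B does one pass over paths accumulating a set of seen article markers and three flags,
-- instead of A's separate scan per pattern; same result (objective: alternative).

-- ===== PORT A =====
def pvArtPatterns : List String :=
  ["/p/", "/post/", "/article/", "/blog/", "/read/", "/editorial/", "/story/"]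

-- 'for pattern in article_patterns: if any(...): patterns['articles'] = ...; break'
def pvALoopArt (paths : List String) : List String → PySem.Dict String String → PySem.Dict String String
  | [], d => d
  | pat :: rest, d =>
      if paths.any (fun p => PySem.Str.isIn pat p)
      then PySem.Dict.insert d "articles" (pat ++ "{slug}")
      else pvALoopArt paths rest d

def detect_url_patterns_py (paths : List String) : List (String × String) :=
  let patterns : PySem.Dict String String := PySem.Dict.empty
  let patterns := pvALoopArt paths pvArtPatterns patterns
  let single_level := paths.filter (fun p =>
    !(p == "") && (PySem.Str.count p "/" == 2) &&
      PySem.Str.startswith p "/" && PySem.Str.endswith p "/")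
  let patterns := if single_level.isEmpty then patterns
                  else PySem.Dict.insert patterns "sections" "/{section-name}"
  let patterns := if paths.any (fun p => PySem.Str.isIn "/tag/" p || PySem.Str.isIn "/tags/" p)
                  then PySem.Dict.insert patterns "tags" "/tag/{tag-name}" else patterns
  let patterns := if paths.any (fun p => PySem.Str.isIn "/category/" p || PySem.Str.isIn "/categories/" p)
                  then PySem.Dict.insert patterns "categories" "/category/{category-name}" else patterns
  patterns.items

-- ===== PORT B =====
-- loop body: state = (found article markers, has_section, has_tag, has_category)
def pvBStep (st : PySem.Set String × Bool × Bool × Bool) (p : String) :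
    PySem.Set String × Bool × Bool × Bool :=
  (pvArtPatterns.foldl (fun s m => if PySem.Str.isIn m p then PySem.Set.add s m else s) st.1,
   st.2.1 || (!(p == "") && (PySem.Str.count p "/" == 2) &&
              PySem.Str.startswith p "/" && PySem.Str.endswith p "/"),
   st.2.2.1 || (PySem.Str.isIn "/tag/" p || PySem.Str.isIn "/tags/" p),
   st.2.2.2 || (PySem.Str.isIn "/category/" p || PySem.Str.isIn "/categories/" p))

-- 'next((m for m in article_patterns if m in found), None)'
def pvPickArt (found : PySem.Set String) : List String → Option String
  | [] => none
  | m :: rest => if m ∈ found then some m else pvPickArt found rest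

def detect_url_patterns_py_alt (paths : List String) : List (String × String) :=
  let st := paths.foldl pvBStep (PySem.Set.empty, false, false, false)
  let d : PySem.Dict String String := PySem.Dict.empty
  let d := match pvPickArt st.1 pvArtPatterns with
           | some m => PySem.Dict.insert d "articles" (m ++ "{slug}")
           | none => d
  let d := if st.2.1 then PySem.Dict.insert d "sections" "/{section-name}" else d
  let d := if st.2.2.1 then PySem.Dict.insert d "tags" "/tag/{tag-name}" else d
  let d := if st.2.2.2 then PySem.Dict.insert d "categories" "/category/{category-name}" else d
  d.items

-- ===== PRECONDITION & SPEC =====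
def Spec_detect_url_patterns_py (paths : List String) (out : List (String × String)) : Prop := out = detect_url_patterns_py_alt paths
instance (paths : List String) (out : List (String × String)) : Decidable (Spec_detect_url_patterns_py paths out) := by unfold Spec_detect_url_patterns_py; infer_instance

-- ===== CLAIM (what is proved, stated in full; the proofs are below) =====
def Claim_equal_detect_url_patterns_py : Prop := ∀ (paths : List String), Dom_detect_url_patterns_py paths → Spec_detect_url_patterns_py paths (detect_url_patterns_py paths)

-- ===== LEMMAS AND PROOFS =====

-- flag components of B's fold
theorem pvFold_sec (paths : List String) (st : PySem.Set String × Bool × Bool × Bool) :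
    (paths.foldl pvBStep st).2.1 =
      (st.2.1 || paths.any (fun p =>
        !(p == "") && (PySem.Str.count p "/" == 2) &&
          PySem.Str.startswith p "/" && PySem.Str.endswith p "/")) := by
  induction paths generalizing st with
  | nil => simp
  | cons p rest ih => simp only [List.foldl_cons, List.any_cons, ih, pvBStep, Bool.or_assoc]

theorem pvFold_tag (paths : List String) (st : PySem.Set String × Bool × Bool × Bool) :
    (paths.foldl pvBStep st).2.2.1 =
      (st.2.2.1 || paths.any (fun p => PySem.Str.isIn "/tag/" p || PySem.Str.isIn "/tags/" p)) := by
  induction paths generalizing st with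
  | nil => simp
  | cons p rest ih => simp only [List.foldl_cons, List.any_cons, ih, pvBStep, Bool.or_assoc]

theorem pvFold_cat (paths : List String) (st : PySem.Set String × Bool × Bool × Bool) :
    (paths.foldl pvBStep st).2.2.2 =
      (st.2.2.2 || paths.any (fun p => PySem.Str.isIn "/category/" p || PySem.Str.isIn "/categories/" p)) := by
  induction paths generalizing st with
  | nil => simp
  | cons p rest ih => simp only [List.foldl_cons, List.any_cons, ih, pvBStep, Bool.or_assoc]

-- membership in the inner per-path fold over the article-pattern list
theorem pvInner_mem (p x : String) (ms : List String) (s : PySem.Set String) :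
    x ∈ ms.foldl (fun s m => if PySem.Str.isIn m p then PySem.Set.add s m else s) s ↔
      x ∈ s ∨ (x ∈ ms ∧ PySem.Str.isIn x p = true) := by
  induction ms generalizing s with
  | nil => simp
  | cons m rest ih =>
      rw [List.foldl_cons, ih]
      by_cases hm : PySem.Str.isIn m p = true
      · rw [if_pos hm]
        rw [PySem.Set.mem_add]
        constructor
        · rintro ((h | rfl) | ⟨h1, h2⟩)
          · exact Or.inl h
          · exact Or.inr ⟨List.mem_cons_self, hm⟩
          · exact Or.inr ⟨List.mem_cons_of_mem _ h1, h2⟩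
        · rintro (h | ⟨h1, h2⟩)
          · exact Or.inl (Or.inl h)
          · rcases List.mem_cons.mp h1 with rfl | h1
            · exact Or.inl (Or.inr rfl)
            · exact Or.inr ⟨h1, h2⟩
      · rw [if_neg hm]
        constructor
        · rintro (h | ⟨h1, h2⟩)
          · exact Or.inl h
          · exact Or.inr ⟨List.mem_cons_of_mem _ h1, h2⟩
        · rintro (h | ⟨h1, h2⟩)
          · exact Or.inl h
          · rcases List.mem_cons.mp h1 with rfl | h1
            · exact absurd h2 hm
            · exact Or.inr ⟨h1, h2⟩

-- membership in the found-set component of B's fold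
theorem pvFold_found (paths : List String) (x : String) (st : PySem.Set String × Bool × Bool × Bool) :
    x ∈ (paths.foldl pvBStep st).1 ↔
      x ∈ st.1 ∨ (x ∈ pvArtPatterns ∧ paths.any (fun p => PySem.Str.isIn x p) = true) := by
  induction paths generalizing st with
  | nil => simp
  | cons p rest ih =>
      rw [List.foldl_cons, ih]
      show x ∈ (pvBStep st p).1 ∨ _ ↔ _
      simp only [pvBStep]
      rw [pvInner_mem]
      simp only [List.any_cons, Bool.or_eq_true]
      tauto

-- A's break loop agrees with B's pick-then-insert, given agreement on each pattern
theorem pvArt_agree (paths : List String) (found : PySem.Set String)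
    (ms : List String)
    (h : ∀ m ∈ ms, (m ∈ found ↔ paths.any (fun p => PySem.Str.isIn m p) = true))
    (d : PySem.Dict String String) :
    pvALoopArt paths ms d =
      (match pvPickArt found ms with
       | some m => PySem.Dict.insert d "articles" (m ++ "{slug}")
       | none => d) := by
  induction ms with
  | nil => rfl
  | cons m rest ih =>
      have hm := h m List.mem_cons_self
      by_cases hc : paths.any (fun p => PySem.Str.isIn m p) = true
      · rw [pvALoopArt, if_pos hc, pvPickArt, if_pos (hm.mpr hc)]
      · have hnm : ¬ m ∈ found := fun hf => hc (hm.mp hf)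
        rw [pvALoopArt, if_neg hc, pvPickArt, if_neg hnm]
        exact ih (fun x hx => h x (List.mem_cons_of_mem _ hx))

-- filter-nonempty test equals the any test
theorem pvFilter_isEmpty (paths : List String) (f : String → Bool) :
    (paths.filter f).isEmpty = !(paths.any f) := by
  induction paths with
  | nil => rfl
  | cons p rest ih =>
      rw [List.filter_cons, List.any_cons]
      by_cases hp : f p = true
      · simp [hp]
      · simp only [Bool.not_eq_true] at hp
        simp [hp, ih]

-- ===== VERDICT (by name: the statement is the Claim_ definition above) =====
theorem detect_url_patterns_py_spec : Claim_equal_detect_url_patterns_py := by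
  intro paths _
  unfold Spec_detect_url_patterns_py detect_url_patterns_py detect_url_patterns_py_alt
  dsimp only
  rw [pvArt_agree paths (paths.foldl pvBStep (PySem.Set.empty, false, false, false)).1
        pvArtPatterns
        (fun m hm => by
          rw [pvFold_found paths m (PySem.Set.empty, false, false, false)]
          simp only [PySem.Set.empty, List.not_mem_nil, false_or]
          exact ⟨fun h => h.2, fun h => ⟨hm, h⟩⟩)]
  rw [pvFold_sec, pvFold_tag, pvFold_cat]
  simp only [Bool.false_or]
  rw [pvFilter_isEmpty]
  cases paths.any (fun p =>
      !(p == "") && (PySem.Str.count p "/" == 2) &&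
        PySem.Str.startswith p "/" && PySem.Str.endswith p "/") <;> rfl
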